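-- pv_equiv track=rewrite | github.com/NickLalo/MarkovMusicMachine | CreateMutatedGraph.py | CreateMutatedGraph
-- ===== SOURCE A (Python) =====
-- def CreateMutatedGraph(selection):
--     chordSelectionList = [1, 2, 3, 4, 5, 6, 7]
--
--     chordsToMutate = []
--     add = []
--
--     for num in range(0, len(selection)):
--
--         # select chord
--         chordsToMutate.append(chordSelectionList[selection[num] % len(chordSelectionList)])
--
--         add = []
--         # update chordSelectionList
--         for value in chordSelectionList:
--             if chordsToMutate[num] != value:
--                 add.append(value)
--         chordSelectionList = chordSelectionList + add
--         chordSelectionList.reverse()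
--
--     return chordsToMutate
-- ===== SOURCE B (Python) =====
-- # B: lazy recursive index lookup into the virtual chord list; never materializes
-- # the exponentially growing list (per-value counts give filtered lengths directly).
-- _BASE = (1, 2, 3, 4, 5, 6, 7)
--
-- def _cnt(rpicks, v):
--     # multiplicity of value v in the virtual list after the picks in rpicks:
--     # it doubles at every pick different from v
--     n = 1
--     for c in rpicks:
--         if c != v:
--             n *= 2
--     return n
--
-- def _flen(rpicks, excl):
--     # length of [v for v in L if v not in excl], L the virtual list after the
--     # picks in rpicks (most recent first)
--     return sum(_cnt(rpicks, v) for v in _BASE if v not in excl)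
--
-- def _fget(rpicks, excl, i):
--     # i-th element of [v for v in L if v not in excl]
--     if not rpicks:
--         return [v for v in _BASE if v not in excl][i]
--     c = rpicks[0]
--     rest = rpicks[1:]
--     la = _flen(rest, excl)
--     lb = _flen(rest, excl | {c})
--     j = la + lb - 1 - i
--     if j < la:
--         return _fget(rest, excl, j)
--     return _fget(rest, excl | {c}, j - la)
--
-- def CreateMutatedGraph(selection):
--     rpicks = []
--     for s in selection:
--         c = _fget(rpicks, frozenset(), s % _flen(rpicks, frozenset()))
--         rpicks = [c] + rpicks
--     return rpicks[::-1]
-- ===== Notes on version B (the rewrite author's own statement) =====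
-- stated objective: faster
-- what changed: Instead of materializing the chord-selection list, which doubles in size every iteration, B answers each index query lazily by recursing through the pick history with closed-form filtered-length bookkeeping, never building the list.
import Mathlib
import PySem

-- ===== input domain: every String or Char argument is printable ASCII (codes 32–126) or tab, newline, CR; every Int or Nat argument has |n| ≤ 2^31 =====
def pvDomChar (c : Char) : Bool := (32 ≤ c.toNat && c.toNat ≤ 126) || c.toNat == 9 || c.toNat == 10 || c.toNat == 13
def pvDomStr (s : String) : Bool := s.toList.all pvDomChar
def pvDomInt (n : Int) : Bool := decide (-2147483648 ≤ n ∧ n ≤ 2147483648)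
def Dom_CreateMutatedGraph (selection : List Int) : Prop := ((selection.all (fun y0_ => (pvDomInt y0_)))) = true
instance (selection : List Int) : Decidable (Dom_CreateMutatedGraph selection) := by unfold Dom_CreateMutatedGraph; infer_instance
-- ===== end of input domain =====

-- B replaces A's exponentially growing materialized chord list by a lazy recursive
-- index lookup through the pick history (objective: faster, asymptotic).

-- ===== PORT A =====
def CreateMutatedGraph (selection : List Int) : List Int :=
  ((PySem.List.pyRange 0 (selection.length : Int) 1).foldl
    (fun (st : List Int × List Int) num =>
      let csl := st.1
      -- chordsToMutate.append(chordSelectionList[selection[num] % len(chordSelectionList)])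
      let ctm := st.2 ++ [(PySem.List.pyGet? csl
          (PySem.Int.mod ((PySem.List.pyGet? selection num).getD 0) (csl.length : Int))).getD 0]
      -- add = [];  for value in chordSelectionList: if chordsToMutate[num] != value: add.append(value)
      let add := csl.foldl
        (fun add value =>
          if (PySem.List.pyGet? ctm num).getD 0 ≠ value then add ++ [value] else add) []
      ((csl ++ add).reverse, ctm))
    ([1, 2, 3, 4, 5, 6, 7], [])).2

-- ===== PORT B =====
def pvBase : List Int := [1, 2, 3, 4, 5, 6, 7]

-- _cnt(rpicks, v): multiplicity of v in the virtual chord list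
def cntB (rpicks : List Int) (v : Int) : Int :=
  rpicks.foldl (fun n c => if c ≠ v then n * 2 else n) 1

-- _flen(rpicks, excl): length of the excl-filtered virtual chord list
def flenB (rpicks excl : List Int) : Int :=
  ((pvBase.filter (fun v => !excl.contains v)).map (cntB rpicks)).sum

-- _fget(rpicks, excl, i): i-th element of the excl-filtered virtual chord list
def fgetB : List Int → List Int → Int → Int
  | [], excl, i => ((PySem.List.pyGet? (pvBase.filter (fun v => !excl.contains v)) i)).getD 0
  | c :: rest, excl, i =>
      let la := flenB rest excl
      let lb := flenB rest (PySem.Set.add excl c)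
      let j := la + lb - 1 - i
      if j < la then fgetB rest excl j else fgetB rest (PySem.Set.add excl c) (j - la)

def CreateMutatedGraph_alt (selection : List Int) : List Int :=
  (selection.foldl
    (fun rpicks s =>
      fgetB rpicks [] (PySem.Int.mod s (flenB rpicks [])) :: rpicks) []).reverse

-- ===== PRECONDITION & SPEC =====
def Spec_CreateMutatedGraph (selection : List Int) (out : List Int) : Prop := out = CreateMutatedGraph_alt selection
instance (selection : List Int) (out : List Int) : Decidable (Spec_CreateMutatedGraph selection out) := by unfold Spec_CreateMutatedGraph; infer_instance

-- ===== CLAIM (what is proved, stated in full; the proofs are below) =====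
def Claim_equal_CreateMutatedGraph : Prop := ∀ (selection : List Int), Dom_CreateMutatedGraph selection → Spec_CreateMutatedGraph selection (CreateMutatedGraph selection)

-- ===== LEMMAS AND PROOFS =====

-- The virtual chord list after the picks in rpicks (most recent first): A's chordSelectionList.
def Lspec : List Int → List Int
  | [] => [1, 2, 3, 4, 5, 6, 7]
  | c :: rest => (Lspec rest ++ (Lspec rest).filter (fun v => decide (c ≠ v))).reverse

lemma Lspec_ne_nil (rp : List Int) : Lspec rp ≠ [] := by
  induction rp with
  | nil => simp [Lspec]
  | cons c rest ih => simp [Lspec, List.reverse_eq_nil_iff, List.append_eq_nil_iff, ih]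

lemma pred_add (excl : List Int) (c v : Int) :
    (!(PySem.Set.add excl c).contains v) = (decide (c ≠ v) && !excl.contains v) := by
  have hmem : v ∈ PySem.Set.add excl c ↔ v ∈ excl ∨ v = c := PySem.Set.mem_add excl c v
  by_cases hc : c = v <;> by_cases he : v ∈ excl <;> simp [hmem, hc, he, eq_comm]

lemma filter_Lspec_cons (rp excl : List Int) (c : Int) :
    (Lspec (c :: rp)).filter (fun v => !excl.contains v)
      = ((Lspec rp).filter (fun v => !excl.contains v)
          ++ (Lspec rp).filter (fun v => !(PySem.Set.add excl c).contains v)).reverse := by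
  simp only [Lspec, List.filter_reverse, List.filter_append, List.filter_filter]
  congr 2
  apply List.filter_congr
  intro v _
  rw [pred_add, Bool.and_comm]

lemma Lspec_mem (rp : List Int) : ∀ x ∈ Lspec rp, x ∈ pvBase := by
  induction rp with
  | nil => intro x hx; exact hx
  | cons c rest ih =>
      intro x hx
      simp only [Lspec, List.mem_reverse, List.mem_append, List.mem_filter] at hx
      rcases hx with h | ⟨h, _⟩ <;> exact ih x h

lemma cntB_cons (c : Int) (rp : List Int) (v : Int) :
    cntB (c :: rp) v = (if c ≠ v then 2 else 1) * cntB rp v := by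
  have key : ∀ (l : List Int) (a : Int),
      l.foldl (fun n c => if c ≠ v then n * 2 else n) a
        = a * l.foldl (fun n c => if c ≠ v then n * 2 else n) 1 := by
    intro l
    induction l with
    | nil => intro a; simp
    | cons x l ihl =>
        intro a
        simp only [List.foldl_cons]
        rw [ihl, ihl (if x ≠ v then 1 * 2 else 1)]
        split_ifs <;> ring
  simp only [cntB, List.foldl_cons]
  rw [key]
  split_ifs <;> ring

lemma cnt_spec (rp : List Int) (v : Int) (hv : v ∈ pvBase) :
    cntB rp v = (((Lspec rp).count v : Nat) : Int) := by
  induction rp with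
  | nil =>
      fin_cases hv <;> rfl
  | cons c rest ih =>
      have hcount : (Lspec (c :: rest)).count v
          = (Lspec rest).count v + ((Lspec rest).filter (fun w => decide (c ≠ w))).count v := by
        simp [Lspec, List.count_reverse, List.count_append]
        omega
      rw [cntB_cons, ih, hcount]
      by_cases hc : c = v
      · subst hc
        have h0 : ((Lspec rest).filter (fun w => decide (c ≠ w))).count c = 0 := by
          simp [List.count_eq_zero, List.mem_filter]
        rw [if_neg (by simp), h0]
        simp
      · have h2 : ((Lspec rest).filter (fun w => decide (c ≠ w))).count v
            = (Lspec rest).count v := by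
          rw [List.count_filter]
          simp [hc]
        rw [if_pos hc, h2]
        push_cast
        ring

lemma length_filter_eq_sum (L : List Int) (p : Int → Bool) (hL : ∀ x ∈ L, x ∈ pvBase) :
    (((L.filter p).length : Nat) : Int)
      = ((pvBase.filter p).map (fun v => (((L.count v : Nat)) : Int))).sum := by
  induction L with
  | nil => simp
  | cons x L ih =>
      have hx : x ∈ pvBase := hL x (by simp)
      have hrest : ∀ y ∈ L, y ∈ pvBase := fun y hy => hL y (by simp [hy])
      have hsum : ((pvBase.filter p).map (fun v => (((x :: L).count v : Nat) : Int))).sum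
          = ((pvBase.filter p).map (fun v => ((L.count v : Nat) : Int))).sum
            + ((pvBase.filter p).map (fun v => if v == x then (1 : Int) else 0)).sum := by
        rw [← PySem.List.sum_map_add_int]
        apply congrArg
        apply List.map_congr_left
        intro v _
        by_cases hv : v = x
        · subst hv
          simp
        · simp only [List.count_cons, beq_iff_eq, hv, if_false]
          simp
          omega
      have hind : ((pvBase.filter p).map (fun v => if v == x then (1 : Int) else 0)).sum
          = if p x then 1 else 0 := by
        rw [PySem.List.sum_map_ite_one_zero]
        have hcp : (pvBase.filter p).countP (fun v => v == x) = (pvBase.filter p).count x := rfl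
        rw [hcp]
        by_cases hp : p x
        · have h1 : (pvBase.filter p).count x = 1 := by
            rw [List.count_filter hp]
            fin_cases hx <;> rfl
          simp [h1, hp]
        · have h1 : (pvBase.filter p).count x = 0 := by
            simp [List.count_eq_zero, List.mem_filter, hp]
          simp [h1, hp]
      rw [hsum, hind, ← ih hrest]
      by_cases hp : p x
      · simp only [List.filter_cons, hp, if_true, List.length_cons]
        push_cast
        ring
      · simp [hp]

lemma flen_spec (rp : List Int) : ∀ excl : List Int,
    flenB rp excl = (((Lspec rp).filter (fun v => !excl.contains v)).length : Int) := by
  intro excl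
  rw [flenB, length_filter_eq_sum (Lspec rp) _ (Lspec_mem rp)]
  apply congrArg
  apply List.map_congr_left
  intro v hv
  exact cnt_spec rp v (List.mem_of_mem_filter hv)

lemma flen_cons (c : Int) (rest excl : List Int) :
    flenB (c :: rest) excl = flenB rest excl + flenB rest (PySem.Set.add excl c) := by
  rw [flen_spec, flen_spec, flen_spec, filter_Lspec_cons]
  simp
  omega

lemma fget_spec (rp : List Int) : ∀ (excl : List Int) (i : Int),
    0 ≤ i → i < flenB rp excl →
    fgetB rp excl i = ((PySem.List.pyGet? ((Lspec rp).filter (fun v => !excl.contains v)) i)).getD 0 := by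
  induction rp with
  | nil => intro excl i _ _; rfl
  | cons c rest ih =>
      intro excl i h0 hlt
      rw [filter_Lspec_cons]
      set F := (Lspec rest).filter (fun v => !excl.contains v) with hF
      set G := (Lspec rest).filter (fun v => !(PySem.Set.add excl c).contains v) with hG
      have hla : flenB rest excl = (F.length : Int) := flen_spec rest excl
      have hlb : flenB rest (PySem.Set.add excl c) = (G.length : Int) := flen_spec rest _
      have hlen : flenB (c :: rest) excl = (F.length : Int) + (G.length : Int) := by
        rw [flen_cons, hla, hlb]
      rw [hlen] at hlt
      have hrev : (PySem.List.pyGet? (F ++ G).reverse i).getD 0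
          = ((F ++ G)[(F ++ G).length - 1 - i.toNat]?).getD 0 := by
        rw [PySem.List.pyGet?_of_nonneg _ h0,
            List.getElem?_reverse (by simp [List.length_append]; omega)]
      rw [hrev]
      show fgetB (c :: rest) excl i = _
      rw [fgetB, hla, hlb]
      set j : Int := (F.length : Int) + (G.length : Int) - 1 - i with hj
      have hj0 : 0 ≤ j := by omega
      have hjlen : j.toNat = (F ++ G).length - 1 - i.toNat := by
        simp [List.length_append]; omega
      by_cases hcase : j < (F.length : Int)
      · rw [if_pos hcase, ih excl j hj0 (by omega), ← hF,
            PySem.List.pyGet?_of_nonneg _ hj0, hjlen,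
            List.getElem?_append_left (by simp [List.length_append] at hjlen ⊢; omega)]
      · rw [if_neg hcase, ih (PySem.Set.add excl c) (j - (F.length : Int)) (by omega) (by omega)]
        have hGr : List.filter (fun v => !List.contains (PySem.Set.add excl c) v) (Lspec rest) = G := rfl
        rw [hGr, PySem.List.pyGet?_of_nonneg _ (by omega)]
        have harith : (F ++ G).length - 1 - i.toNat = F.length + (j - (F.length : Int)).toNat := by
          simp [List.length_append] at hjlen ⊢; omega
        rw [harith, List.getElem?_append_right (by omega)]
        have hidx : F.length + (j - (F.length : Int)).toNat - F.length = (j - (F.length : Int)).toNat := by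
          omega
        rw [hidx]

-- length of the virtual list is positive
lemma Lspec_len_pos (rp : List Int) : 0 < ((Lspec rp).length : Int) := by
  have := Lspec_ne_nil rp
  cases h : Lspec rp with
  | nil => exact absurd h this
  | cons a l => simp

lemma flen_empty (rp : List Int) : flenB rp [] = ((Lspec rp).length : Int) := by
  rw [flen_spec]; simp

-- one B step picks exactly A's chord
lemma pick_eq (rp : List Int) (s : Int) :
    fgetB rp [] (PySem.Int.mod s (flenB rp []))
      = (PySem.List.pyGet? (Lspec rp) (PySem.Int.mod s ((Lspec rp).length : Int))).getD 0 := by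
  have hpos : 0 < ((Lspec rp).length : Int) := Lspec_len_pos rp
  have h0 := PySem.Int.mod_nonneg s hpos
  have h1 := PySem.Int.mod_lt s hpos
  rw [flen_empty]
  rw [fget_spec rp [] _ h0 (by rw [flen_empty]; exact h1)]
  simp

def bFold (sel : List Int) : List Int :=
  sel.foldl (fun rpicks s =>
      fgetB rpicks [] (PySem.Int.mod s (flenB rpicks [])) :: rpicks) []

lemma bFold_snoc (s' : List Int) (s : Int) :
    bFold (s' ++ [s])
      = fgetB (bFold s') [] (PySem.Int.mod s (flenB (bFold s') [])) :: bFold s' := by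
  simp [bFold, List.foldl_append]

lemma bFold_length (sel : List Int) : (bFold sel).length = sel.length := by
  induction sel using List.reverseRecOn with
  | nil => rfl
  | append_singleton s' s ih => simp [bFold_snoc, ih]

lemma aFold_spec (sel : List Int) :
    (PySem.List.pyRange 0 (sel.length : Int) 1).foldl
      (fun (st : List Int × List Int) num =>
        let csl := st.1
        let ctm := st.2 ++ [(PySem.List.pyGet? csl
            (PySem.Int.mod ((PySem.List.pyGet? sel num).getD 0) (csl.length : Int))).getD 0]
        let add := csl.foldl
          (fun add value =>
            if (PySem.List.pyGet? ctm num).getD 0 ≠ value then add ++ [value] else add) []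
        ((csl ++ add).reverse, ctm))
      ([1, 2, 3, 4, 5, 6, 7], [])
    = (Lspec (bFold sel), (bFold sel).reverse) := by
  induction sel using List.reverseRecOn with
  | nil => rfl
  | append_singleton s' s ih =>
      have hlen : ((s' ++ [s]).length : Int) = (s'.length : Int) + 1 := by simp
      rw [hlen, PySem.List.pyRange_one_succ_right (by positivity), List.foldl_append]
      -- on the prefix, indexing s' ++ [s] agrees with indexing s'
      have hpre : ∀ (st : List Int × List Int), ∀ num ∈ PySem.List.pyRange 0 (s'.length : Int),
          (fun (st : List Int × List Int) num =>
            let csl := st.1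
            let ctm := st.2 ++ [(PySem.List.pyGet? csl
                (PySem.Int.mod ((PySem.List.pyGet? (s' ++ [s]) num).getD 0) (csl.length : Int))).getD 0]
            let add := csl.foldl
              (fun add value =>
                if (PySem.List.pyGet? ctm num).getD 0 ≠ value then add ++ [value] else add) []
            ((csl ++ add).reverse, ctm)) st num
          = (fun (st : List Int × List Int) num =>
            let csl := st.1
            let ctm := st.2 ++ [(PySem.List.pyGet? csl
                (PySem.Int.mod ((PySem.List.pyGet? s' num).getD 0) (csl.length : Int))).getD 0]
            let add := csl.foldl
              (fun add value =>
                if (PySem.List.pyGet? ctm num).getD 0 ≠ value then add ++ [value] else add) []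
            ((csl ++ add).reverse, ctm)) st num := by
        intro st num hmem
        have hb := (PySem.List.mem_pyRange_one).mp hmem
        have hget : PySem.List.pyGet? (s' ++ [s]) num = PySem.List.pyGet? s' num := by
          rw [PySem.List.pyGet?_of_nonneg _ hb.1, PySem.List.pyGet?_of_nonneg _ hb.1,
              List.getElem?_append_left (by omega)]
        simp only [hget]
      rw [PySem.List.foldl_congr_mem _ _ _ _ hpre, ih]
      -- the last step
      set rp := bFold s' with hrp
      have hrplen : rp.length = s'.length := bFold_length s'
      have hselget : PySem.List.pyGet? (s' ++ [s]) (s'.length : Int) = some s :=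
        PySem.List.pyGet?_append_length s' [] s
      simp only [List.foldl_cons, List.foldl_nil, hselget, Option.getD_some]
      set cA := (PySem.List.pyGet? (Lspec rp)
          (PySem.Int.mod s ((Lspec rp).length : Int))).getD 0 with hcA
      have hctm : PySem.List.pyGet? (rp.reverse ++ [cA]) (s'.length : Int) = some cA := by
        rw [show ((s'.length : Int)) = ((rp.reverse.length : Int)) by simp [hrplen]]
        exact PySem.List.pyGet?_append_length rp.reverse [] cA
      have hcB : fgetB rp [] (PySem.Int.mod s (flenB rp [])) = cA := pick_eq rp s
      rw [bFold_snoc, ← hrp, hcB]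
      simp only [hctm, Option.getD_some]
      rw [PySem.List.foldl_append_ite_eq_filter (fun value => cA ≠ value)]
      simp [Lspec, List.reverse_cons]

-- ===== VERDICT (by name: the statement is the Claim_ definition above) =====
theorem CreateMutatedGraph_spec : Claim_equal_CreateMutatedGraph := by
  intro sel _
  unfold Spec_CreateMutatedGraph CreateMutatedGraph CreateMutatedGraph_alt
  rw [aFold_spec sel]
  rfl
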